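-- pv_equiv track=rewrite | github.com/thesneakysneak/memory_capacity_retention_rnns | experiment_v2/generic_functions.py | divisible_by_all
-- ===== SOURCE A (Python) =====
-- def divisible_by_all(n):
--     j = i = 0
--     y = []
--     while j < n:
--         i += 1
--         x = 12*i
--         if x % 9 == 0:
--             y.append(x)
--             j += 1
--     return y
-- ===== SOURCE B (Python) =====
-- def divisible_by_all(n):
--     # The multiples of 12 divisible by 9 are exactly the multiples of 36 (lcm):
--     # enumerate them directly, no candidate generation/filtering.
--     return [36 * (k + 1) for k in range(n)]
-- ===== Notes on version B (the rewrite author's own statement) =====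
-- stated objective: faster
-- what changed: Replaces the generate-and-test while loop (try every multiple of 12, keep those divisible by 9) with direct closed-form enumeration of the answers 36*(k+1) for k in range(n).
import Mathlib
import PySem

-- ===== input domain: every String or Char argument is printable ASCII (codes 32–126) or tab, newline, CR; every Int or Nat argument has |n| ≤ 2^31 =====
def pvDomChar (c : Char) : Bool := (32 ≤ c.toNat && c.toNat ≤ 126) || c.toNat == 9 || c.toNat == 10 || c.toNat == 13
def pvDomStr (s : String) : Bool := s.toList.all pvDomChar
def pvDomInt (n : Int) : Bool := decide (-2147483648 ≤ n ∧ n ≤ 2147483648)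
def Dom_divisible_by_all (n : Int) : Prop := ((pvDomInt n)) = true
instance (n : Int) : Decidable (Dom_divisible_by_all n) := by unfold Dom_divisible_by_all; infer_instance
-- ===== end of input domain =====

-- B replaces A's generate-and-test while loop with direct enumeration 36*(k+1) for k in range(n).


-- ===== PORT A =====
-- Python's `%` with the positive divisor 9 coincides with Lean's Int.emod, used here.
-- The fuel is only a totality guard: the while loop runs exactly 3*n iterations
-- (proved via loop_eq below), so fuel (3*n).toNat is never exhausted.
def divisible_by_all_loop (fuel : Nat) (n j i : Int) (acc : List Int) : List Int :=
  match fuel with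
  | 0 => acc
  | fuel + 1 =>
    if j < n then
      if (12 * (i + 1)) % 9 = 0 then
        divisible_by_all_loop fuel n (j + 1) (i + 1) (acc ++ [12 * (i + 1)])
      else
        divisible_by_all_loop fuel n j (i + 1) acc
    else acc

def divisible_by_all (n : Int) : List Int := divisible_by_all_loop (3 * n).toNat n 0 0 []

-- ===== PORT B =====
def divisible_by_all_alt (n : Int) : List Int :=
  (PySem.List.pyRange 0 n 1).map (fun k => 36 * (k + 1))

-- ===== PRECONDITION & SPEC =====
def Spec_divisible_by_all (n : Int) (out : List Int) : Prop := out = divisible_by_all_alt n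
instance (n : Int) (out : List Int) : Decidable (Spec_divisible_by_all n out) := by unfold Spec_divisible_by_all; infer_instance

-- ===== CLAIM (what is proved, stated in full; the proofs are below) =====
def Claim_equal_divisible_by_all : Prop := ∀ (n : Int), Dom_divisible_by_all n → Spec_divisible_by_all n (divisible_by_all n)

-- ===== LEMMAS AND PROOFS =====
-- Loop invariant: at the head of A's loop, i = 3*j; three iterations advance j by one
-- and append exactly 36*(j+1); hence the loop yields 36*(j+1), …, 36*n.
theorem divisible_by_all_loop_eq (d : Nat) : ∀ (fuel : Nat) (n j : Int) (acc : List Int),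
    (n - j).toNat = d → 3 * d ≤ fuel →
    divisible_by_all_loop fuel n j (3 * j) acc
      = acc ++ (PySem.List.pyRange j n 1).map (fun k => 36 * (k + 1)) := by
  induction d with
  | zero =>
    intro fuel n j acc h _
    have hj : ¬ j < n := by omega
    rw [PySem.List.pyRange_one_eq_nil (by omega : n ≤ j)]
    cases fuel with
    | zero => simp [divisible_by_all_loop]
    | succ f => simp [divisible_by_all_loop, hj]
  | succ d ih =>
    intro fuel n j acc h hfuel
    obtain ⟨f, rfl, hf⟩ : ∃ f, fuel = f + 3 ∧ 3 * d ≤ f := ⟨fuel - 3, by omega, by omega⟩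
    have hj : j < n := by omega
    show divisible_by_all_loop (f + 1 + 1 + 1) n j (3 * j) acc = _
    rw [divisible_by_all_loop, if_pos hj,
      if_neg (by omega : ¬ (12 * (3 * j + 1)) % 9 = 0),
      divisible_by_all_loop, if_pos hj,
      if_neg (by omega : ¬ (12 * (3 * j + 1 + 1)) % 9 = 0),
      divisible_by_all_loop, if_pos hj,
      if_pos (by omega : (12 * (3 * j + 1 + 1 + 1)) % 9 = 0)]
    have h3 : 3 * j + 1 + 1 + 1 = 3 * (j + 1) := by ring
    rw [h3, ih f n (j + 1) _ (by omega) hf]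
    rw [PySem.List.pyRange_one_cons hj]
    simp
    ring

theorem divisible_by_all_spec : Claim_equal_divisible_by_all := by
  intro n _
  unfold Spec_divisible_by_all divisible_by_all divisible_by_all_alt
  have key := divisible_by_all_loop_eq (n - 0).toNat ((3 * n).toNat) n 0 [] rfl (by omega)
  norm_num at key
  simpa using key
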